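-- pv_equiv track=rewrite | github.com/vakrilov/advent-of-code | 2024/13/solve.py | solve
-- ===== SOURCE A (Python) =====
-- def solve(btnA, btnB, target, maxCoins=100):
--     solution = float("inf")
--     found = False
--
--     for pressA in range(0, maxCoins + 1):
--         for pressB in range(0, maxCoins + 1):
--             totalX = pressA * btnA[0] + pressB * btnB[0]
--             totalY = pressA * btnA[1] + pressB * btnB[1]
--
--             if (totalX, totalY) == target:
--                 solution = min(solution, pressA * 3 + pressB)
--                 found = True
--     return solution if found else 0
-- ===== SOURCE B (Python) =====
-- def _cand(bx, by, rx, ry, maxCoins):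
--     # minimal b in [0, maxCoins] with b*bx == rx and b*by == ry, else None
--     if bx == 0 and by == 0:
--         return 0 if rx == 0 and ry == 0 else None
--     if bx != 0:
--         if rx % bx != 0:
--             return None
--         b = rx // bx
--         return b if b * by == ry and 0 <= b <= maxCoins else None
--     if rx != 0 or ry % by != 0:
--         return None
--     b = ry // by
--     return b if 0 <= b <= maxCoins else None
--
--
-- def solve(btnA, btnB, target, maxCoins=100):
--     if maxCoins < 0 or len(target) != 2:
--         return 0
--     ax, ay = btnA[0], btnA[1]
--     bx, by = btnB[0], btnB[1]
--     tx, ty = target[0], target[1]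
--     det = ax * by - ay * bx
--     if det != 0:
--         # unique rational solution of the 2x2 system; accept iff integral and in range
--         na = tx * by - ty * bx
--         nb = ax * ty - ay * tx
--         if na % det == 0 and nb % det == 0:
--             a, b = na // det, nb // det
--             if 0 <= a <= maxCoins and 0 <= b <= maxCoins:
--                 return 3 * a + b
--         return 0
--     # degenerate (collinear) case: one pass over a, b is forced (or 0)
--     best = None
--     for a in range(maxCoins + 1):
--         b = _cand(bx, by, tx - a * ax, ty - a * ay, maxCoins)
--         if b is not None:
--             cost = 3 * a + b
--             if best is None or cost < best:
--                 best = cost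
--     return best if best is not None else 0
-- ===== Notes on version B (the rewrite author's own statement) =====
-- stated objective: faster
-- what changed: Replaces the O(maxCoins^2) brute-force double loop over all press counts by directly solving the 2x2 linear system: O(1) when the determinant is nonzero (the normal case), and a single O(maxCoins) pass with the second count forced by divisibility in the degenerate collinear case.
import Mathlib
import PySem

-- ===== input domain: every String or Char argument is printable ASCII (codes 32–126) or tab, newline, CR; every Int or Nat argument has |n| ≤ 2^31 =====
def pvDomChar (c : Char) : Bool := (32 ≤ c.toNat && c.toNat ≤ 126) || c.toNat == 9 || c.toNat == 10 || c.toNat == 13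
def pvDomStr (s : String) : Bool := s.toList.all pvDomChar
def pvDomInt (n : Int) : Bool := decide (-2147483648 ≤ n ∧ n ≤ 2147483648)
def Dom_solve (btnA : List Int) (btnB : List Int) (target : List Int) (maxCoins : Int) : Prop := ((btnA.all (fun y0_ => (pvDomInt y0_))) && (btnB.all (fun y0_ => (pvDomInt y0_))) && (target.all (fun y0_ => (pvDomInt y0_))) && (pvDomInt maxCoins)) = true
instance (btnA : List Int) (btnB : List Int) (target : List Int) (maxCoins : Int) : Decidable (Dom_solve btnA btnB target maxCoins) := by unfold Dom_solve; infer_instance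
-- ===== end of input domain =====

-- ===== PORT A =====
-- B replaces A's O(maxCoins^2) double loop by solving the 2x2 linear system directly
-- (O(1) for nonzero determinant, one O(maxCoins) pass in the degenerate collinear case).
-- Python's float('inf') initial minimum is represented as `none`; min(inf, c) is pyMinInf.
def pyMinInf (o : Option Int) (c : Int) : Option Int :=
  match o with
  | none => some c
  | some u => some (min u c)

def solve (btnA : List Int) (btnB : List Int) (target : List Int) (maxCoins : Int) : Int :=
  let st := (PySem.List.pyRange 0 (maxCoins + 1) 1).foldl
    (fun (st : Option Int × Bool) pressA =>
      (PySem.List.pyRange 0 (maxCoins + 1) 1).foldl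
        (fun (st : Option Int × Bool) pressB =>
          if [pressA * (PySem.List.pyGet? btnA 0).getD 0 + pressB * (PySem.List.pyGet? btnB 0).getD 0,
              pressA * (PySem.List.pyGet? btnA 1).getD 0 + pressB * (PySem.List.pyGet? btnB 1).getD 0] = target
          then (pyMinInf st.1 (pressA * 3 + pressB), true)
          else st)
        st)
    ((none : Option Int), false)
  if st.2 then st.1.getD 0 else 0

-- ===== PORT B =====
-- _cand: the minimal b in [0, maxCoins] with b*bx = rx and b*by = ry, if any.
def candB (bx by_ rx ry maxCoins : Int) : Option Int :=
  if bx = 0 ∧ by_ = 0 then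
    if rx = 0 ∧ ry = 0 then some 0 else none
  else if bx ≠ 0 then
    if PySem.Int.mod rx bx ≠ 0 then none
    else
      if (PySem.Int.floordiv rx bx) * by_ = ry ∧ 0 ≤ PySem.Int.floordiv rx bx ∧ PySem.Int.floordiv rx bx ≤ maxCoins
      then some (PySem.Int.floordiv rx bx) else none
  else if rx ≠ 0 ∨ PySem.Int.mod ry by_ ≠ 0 then none
  else
    if 0 ≤ PySem.Int.floordiv ry by_ ∧ PySem.Int.floordiv ry by_ ≤ maxCoins
    then some (PySem.Int.floordiv ry by_) else none

def solve_alt (btnA : List Int) (btnB : List Int) (target : List Int) (maxCoins : Int) : Int :=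
  if maxCoins < 0 ∨ target.length ≠ 2 then 0
  else
    let ax := (PySem.List.pyGet? btnA 0).getD 0
    let ay := (PySem.List.pyGet? btnA 1).getD 0
    let bx := (PySem.List.pyGet? btnB 0).getD 0
    let by_ := (PySem.List.pyGet? btnB 1).getD 0
    let tx := (PySem.List.pyGet? target 0).getD 0
    let ty := (PySem.List.pyGet? target 1).getD 0
    let det := ax * by_ - ay * bx
    if det ≠ 0 then
      -- unique rational solution of the 2x2 system; accept iff integral and in range
      if PySem.Int.mod (tx * by_ - ty * bx) det = 0 ∧ PySem.Int.mod (ax * ty - ay * tx) det = 0 then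
        if 0 ≤ PySem.Int.floordiv (tx * by_ - ty * bx) det ∧ PySem.Int.floordiv (tx * by_ - ty * bx) det ≤ maxCoins ∧
           0 ≤ PySem.Int.floordiv (ax * ty - ay * tx) det ∧ PySem.Int.floordiv (ax * ty - ay * tx) det ≤ maxCoins
        then 3 * PySem.Int.floordiv (tx * by_ - ty * bx) det + PySem.Int.floordiv (ax * ty - ay * tx) det
        else 0
      else 0
    else
      -- degenerate (collinear) case: one pass over a, b is forced by candB
      let best := (PySem.List.pyRange 0 (maxCoins + 1) 1).foldl
        (fun (best : Option Int) a =>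
          match candB bx by_ (tx - a * ax) (ty - a * ay) maxCoins with
          | none => best
          | some b =>
            match best with
            | none => some (3 * a + b)
            | some v => if 3 * a + b < v then some (3 * a + b) else some v)
        none
      best.getD 0

-- ===== PRECONDITION & SPEC =====
-- Pre_ excludes exactly the inputs on which Python A raises IndexError: a nonnegative
-- maxCoins (so the loop body runs) with btnA or btnB shorter than 2.
def Pre_solve (btnA : List Int) (btnB : List Int) (target : List Int) (maxCoins : Int) : Prop :=
  maxCoins < 0 ∨ (2 ≤ btnA.length ∧ 2 ≤ btnB.length)
instance (btnA : List Int) (btnB : List Int) (target : List Int) (maxCoins : Int) : Decidable (Pre_solve btnA btnB target maxCoins) := by unfold Pre_solve; infer_instance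

def pvWitness_solve : List Int × List Int × List Int × Int := ([1, 0], [0, 1], [2, 3], 5)

def Spec_solve (btnA : List Int) (btnB : List Int) (target : List Int) (maxCoins : Int) (out : Int) : Prop := out = solve_alt btnA btnB target maxCoins
instance (btnA : List Int) (btnB : List Int) (target : List Int) (maxCoins : Int) (out : Int) : Decidable (Spec_solve btnA btnB target maxCoins out) := by unfold Spec_solve; infer_instance

-- ===== CLAIM (what is proved, stated in full; the proofs are below) =====
def Claim_equal_solve : Prop := ∀ (btnA : List Int) (btnB : List Int) (target : List Int) (maxCoins : Int), Dom_solve btnA btnB target maxCoins → Pre_solve btnA btnB target maxCoins → Spec_solve btnA btnB target maxCoins (solve btnA btnB target maxCoins)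

-- ===== LEMMAS AND PROOFS =====

-- option-valued "minimum of the set P" (none = P empty)
def pvIsOMin (o : Option Int) (P : Int → Prop) : Prop :=
  (o = none ∧ ∀ c, ¬ P c) ∨ (∃ c, o = some c ∧ P c ∧ ∀ x, P x → c ≤ x)

-- the set of costs of all hits within the box [0,maxCoins]^2
def pvCost (btnA : List Int) (btnB : List Int) (target : List Int) (maxCoins : Int) (x : Int) : Prop :=
  ∃ a b : Int, 0 ≤ a ∧ a ≤ maxCoins ∧ 0 ≤ b ∧ b ≤ maxCoins ∧
    [a * (PySem.List.pyGet? btnA 0).getD 0 + b * (PySem.List.pyGet? btnB 0).getD 0,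
     a * (PySem.List.pyGet? btnA 1).getD 0 + b * (PySem.List.pyGet? btnB 1).getD 0] = target ∧
    x = a * 3 + b

theorem pvIsOMin_congr {o : Option Int} {P Q : Int → Prop} (h : ∀ x, P x ↔ Q x) (ho : pvIsOMin o P) :
    pvIsOMin o Q := by
  rcases ho with ⟨h1, h2⟩ | ⟨c, h1, h2, h3⟩
  · exact Or.inl ⟨h1, fun c hc => h2 c ((h c).mpr hc)⟩
  · exact Or.inr ⟨c, h1, (h c).mp h2, fun x hx => h3 x ((h x).mpr hx)⟩

theorem pvIsOMin_unique {o o' : Option Int} {P : Int → Prop}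
    (h : pvIsOMin o P) (h' : pvIsOMin o' P) : o = o' := by
  rcases h with ⟨h1, h2⟩ | ⟨c, h1, h2, h3⟩ <;> rcases h' with ⟨g1, g2⟩ | ⟨d, g1, g2, g3⟩
  · rw [h1, g1]
  · exact absurd g2 (h2 d)
  · exact absurd h2 (g2 c)
  · rw [h1, g1]; exact congrArg _ (le_antisymm (h3 d g2) (g3 c h2))

def pvAbsorb (s : Option Int) (o : Option Int) : Option Int :=
  match o with | none => s | some c => pyMinInf s c

theorem pvIsOMin_step {s : Option Int} {Q : Int → Prop} {o : Option Int} {P : Int → Prop}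
    (hs : pvIsOMin s Q) (ho : pvIsOMin o P) :
    pvIsOMin (pvAbsorb s o) (fun x => Q x ∨ P x) := by
  rcases ho with ⟨rfl, hP⟩ | ⟨c, rfl, hPc, hPmin⟩
  · exact pvIsOMin_congr (fun x => by constructor <;> [exact Or.inl; rintro (h | h)] <;> first | exact h | exact absurd h (hP x)) hs
  · rcases hs with ⟨rfl, hQ⟩ | ⟨u, rfl, hQu, hQmin⟩
    · refine Or.inr ⟨c, rfl, Or.inr hPc, ?_⟩
      rintro x (hx | hx)
      · exact absurd hx (hQ x)
      · exact hPmin x hx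
    · refine Or.inr ⟨min u c, rfl, ?_, ?_⟩
      · rcases min_choice u c with h | h <;> rw [h]
        · exact Or.inl hQu
        · exact Or.inr hPc
      · rintro x (hx | hx)
        · exact le_trans (min_le_left _ _) (hQmin x hx)
        · exact le_trans (min_le_right _ _) (hPmin x hx)

theorem pvIsOMin_foldl {α : Type} (P : α → Int → Prop) (f : Option Int → α → Option Int) :
    ∀ (l : List α),
      (∀ (s : Option Int) (Q : Int → Prop) a, a ∈ l → pvIsOMin s Q → pvIsOMin (f s a) (fun x => Q x ∨ P a x)) →
      ∀ (s : Option Int) (Q : Int → Prop), pvIsOMin s Q →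
        pvIsOMin (l.foldl f s) (fun x => Q x ∨ ∃ a ∈ l, P a x) := by
  intro l
  induction l with
  | nil =>
    intro _ s Q hs
    exact pvIsOMin_congr (fun x => by simp) hs
  | cons hd tl ih =>
    intro hstep s Q hs
    have h1 := hstep s Q hd (List.mem_cons_self) hs
    have h2 := ih (fun s Q a ha => hstep s Q a (List.mem_cons_of_mem _ ha)) (f s hd) _ h1
    refine pvIsOMin_congr (fun x => ?_) h2
    simp only [List.mem_cons]
    constructor
    · rintro ((h | h) | ⟨a, ha, h⟩)
      · exact Or.inl h
      · exact Or.inr ⟨hd, Or.inl rfl, h⟩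
      · exact Or.inr ⟨a, Or.inr ha, h⟩
    · rintro (h | ⟨a, rfl | ha, h⟩)
      · exact Or.inl (Or.inl h)
      · exact Or.inl (Or.inr h)
      · exact Or.inr ⟨a, ha, h⟩

-- A's pair state (solution, found) projects onto the pure Option fold: found = isSome.
theorem pvInnerPair (btnA btnB target : List Int) (ps : List Int) (a : Int) :
    ∀ (o : Option Int),
      ps.foldl
        (fun (st : Option Int × Bool) b =>
          if [a * (PySem.List.pyGet? btnA 0).getD 0 + b * (PySem.List.pyGet? btnB 0).getD 0,
              a * (PySem.List.pyGet? btnA 1).getD 0 + b * (PySem.List.pyGet? btnB 1).getD 0] = target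
          then (pyMinInf st.1 (a * 3 + b), true) else st)
        (o, o.isSome)
      = (ps.foldl
          (fun (o : Option Int) b =>
            if [a * (PySem.List.pyGet? btnA 0).getD 0 + b * (PySem.List.pyGet? btnB 0).getD 0,
                a * (PySem.List.pyGet? btnA 1).getD 0 + b * (PySem.List.pyGet? btnB 1).getD 0] = target
            then pyMinInf o (a * 3 + b) else o)
          o,
        (ps.foldl
          (fun (o : Option Int) b =>
            if [a * (PySem.List.pyGet? btnA 0).getD 0 + b * (PySem.List.pyGet? btnB 0).getD 0,
                a * (PySem.List.pyGet? btnA 1).getD 0 + b * (PySem.List.pyGet? btnB 1).getD 0] = target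
            then pyMinInf o (a * 3 + b) else o)
          o).isSome) := by
  induction ps with
  | nil => intro o; rfl
  | cons hd tl ih =>
    intro o
    simp only [List.foldl_cons]
    by_cases h : [a * (PySem.List.pyGet? btnA 0).getD 0 + hd * (PySem.List.pyGet? btnB 0).getD 0,
        a * (PySem.List.pyGet? btnA 1).getD 0 + hd * (PySem.List.pyGet? btnB 1).getD 0] = target
    · simp only [if_pos h]
      have hsome : (pyMinInf o (a * 3 + hd)).isSome = true := by cases o <;> rfl
      have h2 := ih (pyMinInf o (a * 3 + hd))
      rw [hsome] at h2
      exact h2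
    · simp only [if_neg h]
      exact ih o

-- inner loop of A: option-minimum over b
theorem pvInnerMin (btnA btnB target : List Int) (ps : List Int) (a : Int) :
    ∀ (s : Option Int) (Q : Int → Prop), pvIsOMin s Q →
      pvIsOMin (ps.foldl (fun (o : Option Int) b =>
      if [a * (PySem.List.pyGet? btnA 0).getD 0 + b * (PySem.List.pyGet? btnB 0).getD 0,
        a * (PySem.List.pyGet? btnA 1).getD 0 + b * (PySem.List.pyGet? btnB 1).getD 0] = target
      then pyMinInf o (a * 3 + b) else o) s)
        (fun x => Q x ∨ ∃ b ∈ ps, ([a * (PySem.List.pyGet? btnA 0).getD 0 + b * (PySem.List.pyGet? btnB 0).getD 0,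
        a * (PySem.List.pyGet? btnA 1).getD 0 + b * (PySem.List.pyGet? btnB 1).getD 0] = target) ∧ x = a * 3 + b) := by
  refine pvIsOMin_foldl (fun b x => ([a * (PySem.List.pyGet? btnA 0).getD 0 + b * (PySem.List.pyGet? btnB 0).getD 0,
        a * (PySem.List.pyGet? btnA 1).getD 0 + b * (PySem.List.pyGet? btnB 1).getD 0] = target) ∧ x = a * 3 + b) _ ps ?_
  intro s Q b _ hs
  by_cases h : [a * (PySem.List.pyGet? btnA 0).getD 0 + b * (PySem.List.pyGet? btnB 0).getD 0,
        a * (PySem.List.pyGet? btnA 1).getD 0 + b * (PySem.List.pyGet? btnB 1).getD 0] = target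
  · simp only [if_pos h]
    have hsingle : pvIsOMin (some (a * 3 + b)) (fun x => ([a * (PySem.List.pyGet? btnA 0).getD 0 + b * (PySem.List.pyGet? btnB 0).getD 0,
        a * (PySem.List.pyGet? btnA 1).getD 0 + b * (PySem.List.pyGet? btnB 1).getD 0] = target) ∧ x = a * 3 + b) :=
      Or.inr ⟨a * 3 + b, rfl, ⟨h, rfl⟩, fun x hx => le_of_eq hx.2.symm⟩
    exact pvIsOMin_step hs hsingle
  · simp only [if_neg h]
    refine pvIsOMin_congr (fun x => ⟨Or.inl, fun hx => ?_⟩) hs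
    rcases hx with hx | hx
    · exact hx
    · exact absurd hx.1 h

-- the double loop of A: option-minimum over all (a, b)
theorem pvBigMin (btnA btnB target : List Int) (l ps : List Int) :
    pvIsOMin (l.foldl (fun (o : Option Int) a => ps.foldl (fun (o : Option Int) b =>
      if [a * (PySem.List.pyGet? btnA 0).getD 0 + b * (PySem.List.pyGet? btnB 0).getD 0,
        a * (PySem.List.pyGet? btnA 1).getD 0 + b * (PySem.List.pyGet? btnB 1).getD 0] = target
      then pyMinInf o (a * 3 + b) else o) o) none)
      (fun x => ∃ a ∈ l, ∃ b ∈ ps, ([a * (PySem.List.pyGet? btnA 0).getD 0 + b * (PySem.List.pyGet? btnB 0).getD 0,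
        a * (PySem.List.pyGet? btnA 1).getD 0 + b * (PySem.List.pyGet? btnB 1).getD 0] = target) ∧ x = a * 3 + b) := by
  have h := pvIsOMin_foldl (α := Int)
    (fun a x => ∃ b ∈ ps, ([a * (PySem.List.pyGet? btnA 0).getD 0 + b * (PySem.List.pyGet? btnB 0).getD 0,
        a * (PySem.List.pyGet? btnA 1).getD 0 + b * (PySem.List.pyGet? btnB 1).getD 0] = target) ∧ x = a * 3 + b)
    (fun (o : Option Int) a => ps.foldl (fun (o : Option Int) b =>
      if [a * (PySem.List.pyGet? btnA 0).getD 0 + b * (PySem.List.pyGet? btnB 0).getD 0,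
        a * (PySem.List.pyGet? btnA 1).getD 0 + b * (PySem.List.pyGet? btnB 1).getD 0] = target
      then pyMinInf o (a * 3 + b) else o) o) l
    (fun s Q a _ hs => pvInnerMin btnA btnB target ps a s Q hs)
    none (fun _ => False) (Or.inl ⟨rfl, fun _ hc => hc⟩)
  exact pvIsOMin_congr (fun x => by tauto) h

-- outer pair-state fold projects onto the pure Option fold as well
theorem pvOuterPair (btnA btnB target : List Int) (l ps : List Int) (o : Option Int) :
    l.foldl
      (fun (st : Option Int × Bool) a =>
        ps.foldl
          (fun (st : Option Int × Bool) b =>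
            if [a * (PySem.List.pyGet? btnA 0).getD 0 + b * (PySem.List.pyGet? btnB 0).getD 0,
        a * (PySem.List.pyGet? btnA 1).getD 0 + b * (PySem.List.pyGet? btnB 1).getD 0] = target
            then (pyMinInf st.1 (a * 3 + b), true) else st)
          st)
      (o, o.isSome)
    = (l.foldl (fun (o : Option Int) a => ps.foldl (fun (o : Option Int) b =>
      if [a * (PySem.List.pyGet? btnA 0).getD 0 + b * (PySem.List.pyGet? btnB 0).getD 0,
        a * (PySem.List.pyGet? btnA 1).getD 0 + b * (PySem.List.pyGet? btnB 1).getD 0] = target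
      then pyMinInf o (a * 3 + b) else o) o) o,
       (l.foldl (fun (o : Option Int) a => ps.foldl (fun (o : Option Int) b =>
      if [a * (PySem.List.pyGet? btnA 0).getD 0 + b * (PySem.List.pyGet? btnB 0).getD 0,
        a * (PySem.List.pyGet? btnA 1).getD 0 + b * (PySem.List.pyGet? btnB 1).getD 0] = target
      then pyMinInf o (a * 3 + b) else o) o) o).isSome) := by
  induction l generalizing o with
  | nil => rfl
  | cons hd tl ih =>
    simp only [List.foldl_cons]
    have h := pvInnerPair btnA btnB target ps hd o
    rw [h]
    exact ih _

-- A returns (option minimum of pvCost).getD 0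
theorem pvSolve_char (btnA btnB target : List Int) (maxCoins : Int) :
    ∃ o : Option Int, solve btnA btnB target maxCoins = o.getD 0 ∧
      pvIsOMin o (pvCost btnA btnB target maxCoins) := by
  refine ⟨(PySem.List.pyRange 0 (maxCoins + 1) 1).foldl
      (fun (o : Option Int) a => (PySem.List.pyRange 0 (maxCoins + 1) 1).foldl (fun (o : Option Int) b =>
      if [a * (PySem.List.pyGet? btnA 0).getD 0 + b * (PySem.List.pyGet? btnB 0).getD 0,
        a * (PySem.List.pyGet? btnA 1).getD 0 + b * (PySem.List.pyGet? btnB 1).getD 0] = target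
      then pyMinInf o (a * 3 + b) else o)
        o) none, ?_, ?_⟩
  · simp only [solve]
    have h := pvOuterPair btnA btnB target (PySem.List.pyRange 0 (maxCoins + 1) 1)
      (PySem.List.pyRange 0 (maxCoins + 1) 1) none
    simp only [Option.isSome_none] at h
    rw [h]
    cases ((PySem.List.pyRange 0 (maxCoins + 1) 1).foldl
      (fun (o : Option Int) a => (PySem.List.pyRange 0 (maxCoins + 1) 1).foldl (fun (o : Option Int) b =>
      if [a * (PySem.List.pyGet? btnA 0).getD 0 + b * (PySem.List.pyGet? btnB 0).getD 0,
        a * (PySem.List.pyGet? btnA 1).getD 0 + b * (PySem.List.pyGet? btnB 1).getD 0] = target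
      then pyMinInf o (a * 3 + b) else o)
        o) none) <;> rfl
  · refine pvIsOMin_congr (fun x => ?_) (pvBigMin btnA btnB target _ _)
    constructor
    · rintro ⟨a, ha, b, hb, hhit, rfl⟩
      rw [PySem.List.mem_pyRange_one] at ha hb
      exact ⟨a, b, ha.1, by omega, hb.1, by omega, hhit, rfl⟩
    · rintro ⟨a, b, h1, h2, h3, h4, hhit, rfl⟩
      exact ⟨a, by rw [PySem.List.mem_pyRange_one]; omega, b, by rw [PySem.List.mem_pyRange_one]; omega, hhit, rfl⟩

-- candB returns the minimal valid b, as an option-minimum of the per-a cost set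
theorem pvCand_char (bx by_ rx ry M a : Int) (hM : 0 ≤ M) :
    pvIsOMin ((candB bx by_ rx ry M).map (fun b => 3 * a + b))
      (fun x => ∃ b : Int, 0 ≤ b ∧ b ≤ M ∧ b * bx = rx ∧ b * by_ = ry ∧ x = a * 3 + b) := by
  unfold candB
  split_ifs with h1 h2 h3 h4 h5 h6 h7
  · -- btnB = (0,0), target residual zero: b = 0
    refine Or.inr ⟨3 * a + 0, rfl, ⟨0, le_refl 0, hM, by rw [h2.1]; ring, by rw [h2.2]; ring, by ring⟩, ?_⟩
    rintro x ⟨b, hb0, _, _, _, rfl⟩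
    linarith
  · -- btnB = (0,0), nonzero residual: no b
    refine Or.inl ⟨rfl, ?_⟩
    rintro c ⟨b, _, _, hbx, hby, _⟩
    exact h2 ⟨by rw [← hbx, h1.1]; ring, by rw [← hby, h1.2]; ring⟩
  · -- bx ≠ 0, bx does not divide rx: no b
    refine Or.inl ⟨rfl, ?_⟩
    rintro c ⟨b, _, _, hbx, _, _⟩
    exact h4 ((PySem.Int.mod_eq_zero_iff_dvd rx bx).mpr ⟨b, by rw [← hbx]; ring⟩)
  · -- bx ≠ 0, b = rx // bx valid
    have hq : PySem.Int.floordiv rx bx * bx = rx := by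
      have h := PySem.Int.floordiv_mul_add_mod rx bx
      rw [not_not.mp h4] at h
      linarith
    refine Or.inr ⟨3 * a + PySem.Int.floordiv rx bx, rfl,
      ⟨PySem.Int.floordiv rx bx, h5.2.1, h5.2.2, hq, h5.1, by ring⟩, ?_⟩
    rintro x ⟨b, _, _, hbx, _, rfl⟩
    have hb : b = PySem.Int.floordiv rx bx := mul_right_cancel₀ h3 (by rw [hbx, hq])
    rw [hb]; linarith
  · -- bx ≠ 0, b = rx // bx fails a check: no b
    refine Or.inl ⟨rfl, ?_⟩
    rintro c ⟨b, hb1, hb2, hbx, hby, _⟩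
    have hq : PySem.Int.floordiv rx bx * bx = rx := by
      have h := PySem.Int.floordiv_mul_add_mod rx bx
      rw [not_not.mp h4] at h
      linarith
    have hb : b = PySem.Int.floordiv rx bx := mul_right_cancel₀ h3 (by rw [hbx, hq])
    exact h5 ⟨by rw [← hb]; exact hby, by rw [← hb]; exact hb1, by rw [← hb]; exact hb2⟩
  · -- bx = 0, by ≠ 0, residual not a multiple: no b
    have hbx0 : bx = 0 := not_not.mp h3
    refine Or.inl ⟨rfl, ?_⟩
    rintro c ⟨b, _, _, hbx, hby, _⟩
    rcases h6 with h | h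
    · exact h (by rw [← hbx, hbx0]; ring)
    · exact h ((PySem.Int.mod_eq_zero_iff_dvd ry by_).mpr ⟨b, by rw [← hby]; ring⟩)
  · -- bx = 0, by ≠ 0, b = ry // by valid
    have hbx0 : bx = 0 := not_not.mp h3
    have hby0 : by_ ≠ 0 := fun h => h1 ⟨hbx0, h⟩
    push Not at h6
    have hq : PySem.Int.floordiv ry by_ * by_ = ry := by
      have h := PySem.Int.floordiv_mul_add_mod ry by_
      rw [h6.2] at h
      linarith
    refine Or.inr ⟨3 * a + PySem.Int.floordiv ry by_, rfl,
      ⟨PySem.Int.floordiv ry by_, h7.1, h7.2, by rw [hbx0, h6.1]; ring, hq, by ring⟩, ?_⟩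
    rintro x ⟨b, _, _, _, hby, rfl⟩
    have hb : b = PySem.Int.floordiv ry by_ := mul_right_cancel₀ hby0 (by rw [hby, hq])
    rw [hb]; linarith
  · -- bx = 0, by ≠ 0, b = ry // by out of range: no b
    have hbx0 : bx = 0 := not_not.mp h3
    have hby0 : by_ ≠ 0 := fun h => h1 ⟨hbx0, h⟩
    push Not at h6
    have hq : PySem.Int.floordiv ry by_ * by_ = ry := by
      have h := PySem.Int.floordiv_mul_add_mod ry by_
      rw [h6.2] at h
      linarith
    refine Or.inl ⟨rfl, ?_⟩
    rintro c ⟨b, hb1, hb2, _, hby, _⟩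
    have hb : b = PySem.Int.floordiv ry by_ := mul_right_cancel₀ hby0 (by rw [hby, hq])
    exact h7 ⟨by rw [← hb]; exact hb1, by rw [← hb]; exact hb2⟩

-- scalar core of B (proof helper: solve_alt's else-branch after zeta reduction)
def pvCore (A0 A1 B0 B1 t0 t1 M : Int) : Int :=
  if (A0 * B1 - A1 * B0) ≠ 0 then
    if PySem.Int.mod (t0 * B1 - t1 * B0) (A0 * B1 - A1 * B0) = 0 ∧ PySem.Int.mod (A0 * t1 - A1 * t0) (A0 * B1 - A1 * B0) = 0 then
      if 0 ≤ PySem.Int.floordiv (t0 * B1 - t1 * B0) (A0 * B1 - A1 * B0) ∧ PySem.Int.floordiv (t0 * B1 - t1 * B0) (A0 * B1 - A1 * B0) ≤ M ∧ 0 ≤ PySem.Int.floordiv (A0 * t1 - A1 * t0) (A0 * B1 - A1 * B0) ∧ PySem.Int.floordiv (A0 * t1 - A1 * t0) (A0 * B1 - A1 * B0) ≤ M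
      then 3 * PySem.Int.floordiv (t0 * B1 - t1 * B0) (A0 * B1 - A1 * B0) + PySem.Int.floordiv (A0 * t1 - A1 * t0) (A0 * B1 - A1 * B0)
      else 0
    else 0
  else
    ((PySem.List.pyRange 0 (M + 1) 1).foldl
      (fun (best : Option Int) a =>
        match candB B0 B1 (t0 - a * A0) (t1 - a * A1) M with
        | none => best
        | some b =>
          match best with
          | none => some (3 * a + b)
          | some v => if 3 * a + b < v then some (3 * a + b) else some v)
      none).getD 0

theorem pvMinBridge (s : Option Int) (c : Int) :
    (match s with | none => some c | some v => if c < v then some c else some v) = pyMinInf s c := by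
  cases s with
  | none => rfl
  | some v =>
    by_cases h : c < v
    · simp [pyMinInf, if_pos h, min_eq_right h.le]
    · simp [pyMinInf, if_neg h, min_eq_left (not_lt.mp h)]

theorem pvCore_char (A0 A1 B0 B1 t0 t1 M : Int) (hM : 0 ≤ M) :
    ∃ o : Option Int, pvCore A0 A1 B0 B1 t0 t1 M = o.getD 0 ∧
      pvIsOMin o (fun x => ∃ a b : Int, 0 ≤ a ∧ a ≤ M ∧ 0 ≤ b ∧ b ≤ M ∧
        a * A0 + b * B0 = t0 ∧ a * A1 + b * B1 = t1 ∧ x = a * 3 + b) := by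
  unfold pvCore
  by_cases hdet : (A0 * B1 - A1 * B0) ≠ 0
  · rw [if_pos hdet]
    by_cases hmod : PySem.Int.mod (t0 * B1 - t1 * B0) (A0 * B1 - A1 * B0) = 0 ∧ PySem.Int.mod (A0 * t1 - A1 * t0) (A0 * B1 - A1 * B0) = 0
    · rw [if_pos hmod]
      have ha : PySem.Int.floordiv (t0 * B1 - t1 * B0) (A0 * B1 - A1 * B0) * (A0 * B1 - A1 * B0) = (t0 * B1 - t1 * B0) := by
        have h := PySem.Int.floordiv_mul_add_mod (t0 * B1 - t1 * B0) (A0 * B1 - A1 * B0)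
        rw [hmod.1] at h
        linarith
      have hb : PySem.Int.floordiv (A0 * t1 - A1 * t0) (A0 * B1 - A1 * B0) * (A0 * B1 - A1 * B0) = (A0 * t1 - A1 * t0) := by
        have h := PySem.Int.floordiv_mul_add_mod (A0 * t1 - A1 * t0) (A0 * B1 - A1 * B0)
        rw [hmod.2] at h
        linarith
      by_cases hrng : 0 ≤ PySem.Int.floordiv (t0 * B1 - t1 * B0) (A0 * B1 - A1 * B0) ∧ PySem.Int.floordiv (t0 * B1 - t1 * B0) (A0 * B1 - A1 * B0) ≤ M ∧ 0 ≤ PySem.Int.floordiv (A0 * t1 - A1 * t0) (A0 * B1 - A1 * B0) ∧ PySem.Int.floordiv (A0 * t1 - A1 * t0) (A0 * B1 - A1 * B0) ≤ M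
      · rw [if_pos hrng]
        obtain ⟨hr1, hr2, hr3, hr4⟩ := hrng
        refine ⟨some (3 * PySem.Int.floordiv (t0 * B1 - t1 * B0) (A0 * B1 - A1 * B0) + PySem.Int.floordiv (A0 * t1 - A1 * t0) (A0 * B1 - A1 * B0)), rfl, Or.inr ⟨3 * PySem.Int.floordiv (t0 * B1 - t1 * B0) (A0 * B1 - A1 * B0) + PySem.Int.floordiv (A0 * t1 - A1 * t0) (A0 * B1 - A1 * B0), rfl,
          ⟨PySem.Int.floordiv (t0 * B1 - t1 * B0) (A0 * B1 - A1 * B0), PySem.Int.floordiv (A0 * t1 - A1 * t0) (A0 * B1 - A1 * B0), hr1, hr2, hr3, hr4,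
            mul_right_cancel₀ hdet (by linear_combination A0 * ha + B0 * hb),
            mul_right_cancel₀ hdet (by linear_combination A1 * ha + B1 * hb), by ring⟩, ?_⟩⟩
        rintro x ⟨a, b, _, _, _, _, e1, e2, rfl⟩
        have ha' : a = PySem.Int.floordiv (t0 * B1 - t1 * B0) (A0 * B1 - A1 * B0) :=
          mul_right_cancel₀ hdet (by linear_combination B1 * e1 - B0 * e2 - ha)
        have hb' : b = PySem.Int.floordiv (A0 * t1 - A1 * t0) (A0 * B1 - A1 * B0) :=
          mul_right_cancel₀ hdet (by linear_combination A0 * e2 - A1 * e1 - hb)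
        rw [ha', hb']
        linarith
      · rw [if_neg hrng]
        refine ⟨none, rfl, Or.inl ⟨rfl, ?_⟩⟩
        rintro x ⟨a, b, h1, h2, h3, h4, e1, e2, rfl⟩
        have ha' : a = PySem.Int.floordiv (t0 * B1 - t1 * B0) (A0 * B1 - A1 * B0) :=
          mul_right_cancel₀ hdet (by linear_combination B1 * e1 - B0 * e2 - ha)
        have hb' : b = PySem.Int.floordiv (A0 * t1 - A1 * t0) (A0 * B1 - A1 * B0) :=
          mul_right_cancel₀ hdet (by linear_combination A0 * e2 - A1 * e1 - hb)
        exact hrng ⟨by omega, by omega, by omega, by omega⟩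
    · rw [if_neg hmod]
      refine ⟨none, rfl, Or.inl ⟨rfl, ?_⟩⟩
      rintro x ⟨a, b, _, _, _, _, e1, e2, rfl⟩
      have ha' : a * (A0 * B1 - A1 * B0) = (t0 * B1 - t1 * B0) := by linear_combination B1 * e1 - B0 * e2
      have hb' : b * (A0 * B1 - A1 * B0) = (A0 * t1 - A1 * t0) := by linear_combination A0 * e2 - A1 * e1
      exact hmod ⟨(PySem.Int.mod_eq_zero_iff_dvd _ _).mpr ⟨a, by rw [← ha']; ring⟩,
        (PySem.Int.mod_eq_zero_iff_dvd _ _).mpr ⟨b, by rw [← hb']; ring⟩⟩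
  · rw [if_neg hdet]
    have hdet0 : (A0 * B1 - A1 * B0) = 0 := not_not.mp hdet
    refine ⟨_, rfl, ?_⟩
    have h := pvIsOMin_foldl (α := Int)
      (fun a x => ∃ b : Int, 0 ≤ b ∧ b ≤ M ∧ b * B0 = t0 - a * A0 ∧ b * B1 = t1 - a * A1 ∧ x = a * 3 + b)
      (fun (best : Option Int) a =>
        match candB B0 B1 (t0 - a * A0) (t1 - a * A1) M with
        | none => best
        | some b =>
          match best with
          | none => some (3 * a + b)
          | some v => if 3 * a + b < v then some (3 * a + b) else some v)
      (PySem.List.pyRange 0 (M + 1) 1) ?step none (fun _ => False) (Or.inl ⟨rfl, fun _ hc => hc⟩)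
    case step =>
      intro s Q a _ hs
      beta_reduce
      have hc := pvCand_char B0 B1 (t0 - a * A0) (t1 - a * A1) M a hM
      have hstep := pvIsOMin_step hs hc
      cases e : candB B0 B1 (t0 - a * A0) (t1 - a * A1) M with
      | none =>
        rw [e] at hstep
        exact hstep
      | some b =>
        rw [e] at hstep
        simp only [Option.map_some, pvAbsorb] at hstep
        cases s with
        | none => exact hstep
        | some v =>
          show pvIsOMin (if 3 * a + b < v then some (3 * a + b) else some v) _
          have hb2 : (if 3 * a + b < v then some (3 * a + b) else some v) = pyMinInf (some v) (3 * a + b) :=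
            pvMinBridge (some v) (3 * a + b)
          rw [hb2]
          exact hstep
    refine pvIsOMin_congr (fun x => ?_) h
    constructor
    · rintro (h | ⟨a, ha, b, hb1, hb2, e1, e2, rfl⟩)
      · exact absurd h (fun h => h)
      · rw [PySem.List.mem_pyRange_one] at ha
        exact ⟨a, b, ha.1, by omega, hb1, hb2, by linarith, by linarith, rfl⟩
    · rintro ⟨a, b, h1, h2, h3, h4, e1, e2, rfl⟩
      exact Or.inr ⟨a, by rw [PySem.List.mem_pyRange_one]; omega,
        b, h3, h4, by linarith, by linarith, rfl⟩

-- B returns (option minimum of pvCost).getD 0 as well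
theorem pvAlt_char (btnA btnB target : List Int) (maxCoins : Int) :
    ∃ o : Option Int, solve_alt btnA btnB target maxCoins = o.getD 0 ∧
      pvIsOMin o (pvCost btnA btnB target maxCoins) := by
  by_cases hg : maxCoins < 0 ∨ target.length ≠ 2
  · refine ⟨none, ?_, Or.inl ⟨rfl, ?_⟩⟩
    · simp only [solve_alt, if_pos hg]
      rfl
    · rintro c ⟨a, b, h1, h2, h3, h4, hhit, _⟩
      rcases hg with hg | hg
      · omega
      · exact hg (by rw [← hhit]; rfl)
  · push Not at hg
    obtain ⟨hM, hlen⟩ := hg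
    rcases target with _ | ⟨t0, tl⟩
    · simp at hlen
    rcases tl with _ | ⟨t1, tl2⟩
    · simp at hlen
    rcases tl2 with _ | ⟨u, tl3⟩
    swap
    · simp at hlen
    obtain ⟨o, ho, hmin⟩ := pvCore_char ((PySem.List.pyGet? btnA 0).getD 0)
      ((PySem.List.pyGet? btnA 1).getD 0) ((PySem.List.pyGet? btnB 0).getD 0)
      ((PySem.List.pyGet? btnB 1).getD 0) t0 t1 maxCoins (by omega)
    refine ⟨o, ?_, ?_⟩
    · have hv : solve_alt btnA btnB [t0, t1] maxCoins =
          pvCore ((PySem.List.pyGet? btnA 0).getD 0) ((PySem.List.pyGet? btnA 1).getD 0)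
            ((PySem.List.pyGet? btnB 0).getD 0) ((PySem.List.pyGet? btnB 1).getD 0) t0 t1 maxCoins := by
        simp only [solve_alt, if_neg (show ¬(maxCoins < 0 ∨ ([t0, t1] : List Int).length ≠ 2) by
          rintro (h | h)
          · omega
          · exact h rfl)]
        rfl
      rw [hv, ho]
    · refine pvIsOMin_congr (fun x => ?_) hmin
      unfold pvCost
      constructor
      · rintro ⟨a, b, h1, h2, h3, h4, e1, e2, rfl⟩
        exact ⟨a, b, h1, h2, h3, h4, by rw [e1, e2], rfl⟩
      · rintro ⟨a, b, h1, h2, h3, h4, hhit, rfl⟩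
        rw [List.cons.injEq, List.cons.injEq] at hhit
        exact ⟨a, b, h1, h2, h3, h4, hhit.1, hhit.2.1, rfl⟩

-- ===== VERDICT (by name: the statement is the Claim_ definition above) =====
theorem solve_spec : Claim_equal_solve := by
  intro btnA btnB target maxCoins _ _
  unfold Spec_solve
  obtain ⟨o, ho, hmin⟩ := pvSolve_char btnA btnB target maxCoins
  obtain ⟨o', ho', hmin'⟩ := pvAlt_char btnA btnB target maxCoins
  rw [ho, ho', pvIsOMin_unique hmin hmin']
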